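-- pv_equiv track=rewrite | github.com/mariajuliaquilis/IP-AED1 | Parciales y simulacros/Python/Simulacro 1C2025 TM/parcial.py | maxima_cantidad_primos
-- ===== SOURCE A (Python) =====
-- def lista_numeros(numero: int) -> list[int]:
--     res: list[int] = []
--     indice: int = 1
--     while indice <= numero:
--         res.append(indice)
--         indice+=1
--     return res
--
-- def lista_divisores(lista: list[int], numero: int) -> list[int]:
--     res: list[int] = []
--     for elemento in lista:
--         if numero % elemento == 0:
--             res.append(elemento)
--     return res
--
-- def es_primo(numero: int) -> bool:
--     return lista_divisores(lista_numeros(numero), numero) == [1, numero]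
--
-- def maxima_cantidad_primos(A: list[list[int]]) -> int:
--     cantidad_maxima = 0
--     for j in range(len(A[0])):
--         cantidad_actual = 0
--         for i in range(len(A)):
--             if es_primo(A[i][j]):
--                 cantidad_actual+=1
--         if cantidad_actual > cantidad_maxima:
--             cantidad_maxima = cantidad_actual
--     return cantidad_maxima
-- ===== SOURCE B (Python) =====
-- def lista_numeros(numero: int) -> list[int]:
--     res: list[int] = []
--     indice: int = 1
--     while indice <= numero:
--         res.append(indice)
--         indice += 1
--     return res
--
-- def lista_divisores(lista: list[int], numero: int) -> list[int]:
--     res: list[int] = []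
--     for elemento in lista:
--         if numero % elemento == 0:
--             res.append(elemento)
--     return res
--
-- def es_primo(numero: int) -> bool:
--     return lista_divisores(lista_numeros(numero), numero) == [1, numero]
--
-- def maxima_cantidad_primos(A: list[list[int]]) -> int:
--     ncols = len(A[0])
--     counts = [0] * ncols
--     for row in A:
--         counts = [c + es_primo(x) for c, x in zip(counts, row)]
--     return max(counts, default=0)
-- ===== Notes on version B (the rewrite author's own statement) =====
-- stated objective: alternative
-- what changed: Replaces the column-major double scan with a single scalar max by a row-major pass maintaining a per-column counts vector (zip-updated per row) finished with max(counts, default=0).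
import Mathlib
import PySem

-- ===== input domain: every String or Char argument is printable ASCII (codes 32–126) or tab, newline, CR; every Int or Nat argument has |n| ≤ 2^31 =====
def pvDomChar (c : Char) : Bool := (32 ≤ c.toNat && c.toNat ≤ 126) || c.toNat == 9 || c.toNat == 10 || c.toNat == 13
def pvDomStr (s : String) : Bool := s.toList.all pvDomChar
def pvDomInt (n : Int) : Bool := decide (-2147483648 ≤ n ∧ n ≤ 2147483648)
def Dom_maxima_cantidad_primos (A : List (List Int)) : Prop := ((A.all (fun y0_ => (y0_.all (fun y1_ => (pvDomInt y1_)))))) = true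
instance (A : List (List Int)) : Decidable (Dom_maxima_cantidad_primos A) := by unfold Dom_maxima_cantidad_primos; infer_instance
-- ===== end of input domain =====

-- B replaces A's column-major scan (one scalar counter per column, running max) by a
-- row-major pass over a per-column counts vector, finished with max(counts, default=0);
-- same cost, different data structure ("alternative").

-- ===== PORT A =====
-- while indice <= numero: res.append(indice); indice += 1
-- (the append accumulator is kept reversed and flipped once at the end, so evaluation is linear)
def lista_numeros_loop (numero indice : Int) (res : List Int) : List Int :=
  if _h : indice ≤ numero then lista_numeros_loop numero (indice + 1) (indice :: res) else res.reverse
termination_by (numero + 1 - indice).toNat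
decreasing_by omega

def lista_numeros (numero : Int) : List Int := lista_numeros_loop numero 1 []

def lista_divisores (lista : List Int) (numero : Int) : List Int :=
  lista.foldl (fun res elemento =>
    if PySem.Int.mod numero elemento = 0 then res ++ [elemento] else res) []

def es_primo (numero : Int) : Bool :=
  lista_divisores (lista_numeros numero) numero == [1, numero]

def maxima_cantidad_primos (A : List (List Int)) : Int :=
  (List.range (A.headD []).length).foldl
    (fun cantidad_maxima j =>
      let cantidad_actual := (List.range A.length).foldl
        (fun c i => if es_primo ((A.getD i []).getD j 0) then c + 1 else c) 0
      if cantidad_actual > cantidad_maxima then cantidad_actual else cantidad_maxima) 0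

-- ===== PORT B =====
def maxima_cantidad_primos_alt (A : List (List Int)) : Int :=
  let ncols := (A.headD []).length
  let counts := A.foldl
    (fun counts row =>
      List.zipWith (fun c x => c + (if es_primo x then 1 else 0)) counts row)
    (List.replicate ncols (0 : Int))
  PySem.List.maxD counts (fun x => x) 0

-- ===== PRECONDITION & SPEC =====
-- Pre_ excludes exactly the inputs on which A raises: A[0] raises IndexError on the empty
-- matrix, and A[i][j] raises IndexError when some row is shorter than the first row.
def Pre_maxima_cantidad_primos (A : List (List Int)) : Prop :=
  A ≠ [] ∧ ∀ row ∈ A, (A.headD []).length ≤ row.length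
instance (A : List (List Int)) : Decidable (Pre_maxima_cantidad_primos A) := by
  unfold Pre_maxima_cantidad_primos; infer_instance

def pvWitness_maxima_cantidad_primos : List (List Int) := [[2, 3, 4], [5, 6, 7]]

def Spec_maxima_cantidad_primos (A : List (List Int)) (out : Int) : Prop := out = maxima_cantidad_primos_alt A
instance (A : List (List Int)) (out : Int) : Decidable (Spec_maxima_cantidad_primos A out) := by unfold Spec_maxima_cantidad_primos; infer_instance

-- ===== CLAIM (what is proved, stated in full; the proofs are below) =====
def Claim_equal_maxima_cantidad_primos : Prop := ∀ (A : List (List Int)), Dom_maxima_cantidad_primos A → Pre_maxima_cantidad_primos A → Spec_maxima_cantidad_primos A (maxima_cantidad_primos A)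

-- ===== LEMMAS AND PROOFS =====

-- per-column prime count, the quantity both programs compute per column
def colcnt (rows : List (List Int)) (j : Nat) : Int :=
  rows.foldl (fun c row => if es_primo (row.getD j 0) then c + 1 else c) 0

theorem colcnt_nonneg (rows : List (List Int)) (j : Nat) : 0 ≤ colcnt rows j := by
  unfold colcnt
  rw [PySem.List.foldl_count_if]
  positivity

theorem colcnt_cons (r : List Int) (rs : List (List Int)) (j : Nat) :
    colcnt (r :: rs) j = (if es_primo (r.getD j 0) then 1 else 0) + colcnt rs j := by
  unfold colcnt
  simp only [List.foldl_cons]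
  rw [PySem.List.foldl_count_if, PySem.List.foldl_count_if]
  split <;> omega

-- A's inner index loop is the fold over the rows themselves
theorem foldl_range_getD {α β : Type} (l : List α) (d : α) (g : β → α → β) (init : β) :
    (List.range l.length).foldl (fun c i => g c (l.getD i d)) init = l.foldl g init := by
  induction l generalizing init with
  | nil => simp
  | cons a as ih =>
      simp only [List.length_cons, List.range_succ_eq_map, List.foldl_cons, List.foldl_map,
        List.getD_cons_zero, List.getD_cons_succ]
      exact ih (g init a)

-- one row's zipWith update on a range-map counts vector
theorem zipWith_map_range (f : Nat → Int) (row : List Int) (n : Nat) (h : n ≤ row.length) :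
    List.zipWith (fun c x => c + (if es_primo x then 1 else 0)) ((List.range n).map f) row
      = (List.range n).map (fun j => f j + (if es_primo (row.getD j 0) then 1 else 0)) := by
  induction n generalizing f row with
  | zero => simp
  | succ n ih =>
      cases row with
      | nil => simp at h
      | cons r rs =>
          simp only [List.range_succ_eq_map, List.map_cons, List.map_map, List.zipWith_cons_cons,
            List.getD_cons_zero]
          rw [ih (f ∘ Nat.succ) rs (by simpa using h)]
          simp [Function.comp]

-- B's row loop accumulates exactly the per-column counts
theorem counts_fold (rows : List (List Int)) (n : Nat) (f : Nat → Int)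
    (h : ∀ row ∈ rows, n ≤ row.length) :
    rows.foldl
      (fun cs row => List.zipWith (fun c x => c + (if es_primo x then 1 else 0)) cs row)
      ((List.range n).map f)
      = (List.range n).map (fun j => f j + colcnt rows j) := by
  induction rows generalizing f with
  | nil => simp [colcnt]
  | cons r rs ih =>
      simp only [List.foldl_cons]
      rw [zipWith_map_range f r n (h r (List.mem_cons_self ..))]
      rw [ih (fun j => f j + (if es_primo (r.getD j 0) then 1 else 0))
          (fun row hm => h row (List.mem_cons_of_mem _ hm))]
      refine List.map_congr_left (fun j _ => ?_)
      rw [colcnt_cons]; ring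

-- max(counts, default=0) of a nonneg list is the running max from 0
theorem maxD_eq_foldl_max_zero (l : List Int) (h : ∀ x ∈ l, 0 ≤ x) :
    PySem.List.maxD l (fun x => x) 0 = l.foldl max 0 := by
  cases l with
  | nil => simp [PySem.List.maxD, PySem.List.max?]
  | cons c t =>
      have hc : max 0 c = c := max_eq_right (h c (List.mem_cons_self ..))
      simp [PySem.List.maxD, PySem.List.max?_id_cons, List.foldl_cons, hc]

theorem maxima_cantidad_primos_eq (A : List (List Int))
    (h : ∀ row ∈ A, (A.headD []).length ≤ row.length) :
    maxima_cantidad_primos A = maxima_cantidad_primos_alt A := by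
  have hA : maxima_cantidad_primos A
      = ((List.range (A.headD []).length).map (fun j => colcnt A j)).foldl max 0 := by
    unfold maxima_cantidad_primos
    rw [List.foldl_map]
    refine PySem.List.foldl_congr_mem _ _ _ _ ?_
    intro m j _
    show (if (List.range A.length).foldl
          (fun c i => if es_primo ((A.getD i []).getD j 0) then c + 1 else c) 0 > m
        then (List.range A.length).foldl
          (fun c i => if es_primo ((A.getD i []).getD j 0) then c + 1 else c) 0
        else m) = max m (colcnt A j)
    rw [foldl_range_getD A [] (fun c row => if es_primo (row.getD j 0) then c + 1 else c) 0]
    show (if colcnt A j > m then colcnt A j else m) = max m (colcnt A j)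
    simp only [max_def]
    split_ifs <;> omega
  have hB : maxima_cantidad_primos_alt A
      = PySem.List.maxD ((List.range (A.headD []).length).map
          (fun j => (0 : Int) + colcnt A j)) (fun x => x) 0 := by
    show PySem.List.maxD
      (A.foldl (fun cs row => List.zipWith (fun c x => c + (if es_primo x then 1 else 0)) cs row)
        (List.replicate (A.headD []).length (0 : Int))) (fun x => x) 0 = _
    rw [show List.replicate (A.headD []).length (0 : Int)
          = (List.range (A.headD []).length).map (fun _ => (0 : Int)) by simp [List.map_const'],
        counts_fold A (A.headD []).length (fun _ => 0) h]
  rw [hA, hB, maxD_eq_foldl_max_zero]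
  · simp
  · intro x hx
    obtain ⟨j, _, rfl⟩ := List.mem_map.mp hx
    simpa using colcnt_nonneg A j

-- ===== VERDICT (by name: the statement is the Claim_ definition above) =====
theorem maxima_cantidad_primos_spec : Claim_equal_maxima_cantidad_primos := by
  intro A _ hpre
  unfold Spec_maxima_cantidad_primos
  exact maxima_cantidad_primos_eq A hpre.2
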